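-- pv_equiv track=rewrite | github.com/AlexGorSvami/CODE | PYTHON/Leetcode/Maximum_Number_of_Words_You_Can_Type.py | canBeTypeWords
-- ===== SOURCE A (Python) =====
-- def canBeTypeWords(text: str, brokenLetters: str) -> int:
--     split_text = text.split()
--     t = [1] * len(split_text)
--     for i in brokenLetters:
--         for j in range(len(split_text)):
--             if i in split_text[j]:
--                 t[j] = 0
--     return sum(t)
-- ===== SOURCE B (Python) =====
-- def canBeTypeWords(text: str, brokenLetters: str) -> int:
--     broken = set(brokenLetters)
--     return sum(1 for w in text.split() if all(c not in broken for c in w))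
-- ===== Notes on version B (the rewrite author's own statement) =====
-- stated objective: faster
-- what changed: Replaces A's nested loop over broken letters x word indices with a [1]*n flag list summed at the end by a single pass over the words, counting directly those whose characters avoid a precomputed broken-letter set.
import Mathlib
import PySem

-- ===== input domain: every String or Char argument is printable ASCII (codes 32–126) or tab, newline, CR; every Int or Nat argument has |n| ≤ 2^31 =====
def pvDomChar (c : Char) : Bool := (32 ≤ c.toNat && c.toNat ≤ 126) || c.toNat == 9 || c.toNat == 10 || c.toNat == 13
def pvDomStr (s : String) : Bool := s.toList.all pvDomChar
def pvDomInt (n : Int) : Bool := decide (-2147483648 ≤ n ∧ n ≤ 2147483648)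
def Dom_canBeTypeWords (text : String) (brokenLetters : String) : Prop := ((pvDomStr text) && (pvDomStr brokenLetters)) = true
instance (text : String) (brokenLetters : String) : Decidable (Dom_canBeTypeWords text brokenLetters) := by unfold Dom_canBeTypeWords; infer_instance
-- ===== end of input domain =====

-- B replaces A's nested loops over broken letters × word indices (a [1]*n flag list summed at
-- the end) by one pass over the words, counting those avoiding a precomputed broken-letter set;
-- objective: faster (one pass over the words against a set, instead of a pass per broken letter).

-- ===== PORT A =====
-- 'i in split_text[j]' with i a one-character string is exactly character membership.
def canBeTypeWords (text : String) (brokenLetters : String) : Int :=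
  let split_text := PySem.Str.split₀ text
  let t : List Int := List.replicate split_text.length 1
  let t := brokenLetters.toList.foldl (fun t i =>
      (PySem.List.pyRange 0 (split_text.length : Int) 1).foldl (fun t j =>
        if (PySem.List.pyGetD split_text j "").toList.contains i then t.set j.toNat 0 else t) t) t
  t.sum

-- ===== PORT B =====
-- sum(1 for w in text.split() if all(c not in broken for c in w)) is a countP over the words.
def canBeTypeWords_alt (text : String) (brokenLetters : String) : Int :=
  let broken := PySem.Set.ofList brokenLetters.toList
  ((PySem.Str.split₀ text).countP
    (fun w => w.toList.all (fun c => !(PySem.Set.contains broken c))) : Int)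

-- ===== PRECONDITION & SPEC =====
def Spec_canBeTypeWords (text : String) (brokenLetters : String) (out : Int) : Prop := out = canBeTypeWords_alt text brokenLetters
instance (text : String) (brokenLetters : String) (out : Int) : Decidable (Spec_canBeTypeWords text brokenLetters out) := by unfold Spec_canBeTypeWords; infer_instance

-- ===== CLAIM (what is proved, stated in full; the proofs are below) =====
def Claim_equal_canBeTypeWords : Prop := ∀ (text : String) (brokenLetters : String), Dom_canBeTypeWords text brokenLetters → Spec_canBeTypeWords text brokenLetters (canBeTypeWords text brokenLetters)

-- ===== LEMMAS AND PROOFS =====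

-- one pass of A's inner loop zeroes exactly the indices whose word contains i
lemma pvInner_eq (words : List String) (i : Char) (t : List Int) (m : Nat) :
    (PySem.List.pyRange 0 (m : Int) 1).foldl (fun t j =>
        if (PySem.List.pyGetD words j "").toList.contains i then t.set j.toNat 0 else t) t
      = t.mapIdx (fun k x =>
          if k < m ∧ (PySem.List.pyGetD words (k : Int) "").toList.contains i then 0 else x) := by
  induction m with
  | zero =>
      rw [PySem.List.pyRange_one_eq_nil (by omega)]
      simp
      refine (List.ext_getElem (by simp) ?_).symm
      intro k h1 h2; simp
  | succ m ih =>
      have : ((m + 1 : Nat) : Int) = (m : Int) + 1 := by push_cast; ring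
      rw [this, PySem.List.pyRange_one_succ_right (by positivity), List.foldl_append, ih]
      simp only [List.foldl_cons, List.foldl_nil]
      split_ifs with h
      · refine List.ext_getElem (by simp) ?_
        intro k h1 h2
        simp only [Int.toNat_natCast, List.getElem_set, List.getElem_mapIdx]
        rcases eq_or_ne m k with rfl | hmk
        · simp only [Int.toNat_natCast, List.getElem_set, if_pos rfl, List.getElem_mapIdx]
          exact (if_pos ⟨Nat.lt_succ_self m, h⟩).symm
        · simp only [hmk, if_false]
          congr 1
          simp only [eq_iff_iff, and_congr_left_iff]
          intro _; omega
      · refine List.ext_getElem (by simp) ?_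
        intro k h1 h2
        simp only [List.getElem_mapIdx]
        congr 1
        simp only [eq_iff_iff, and_congr_left_iff]
        intro hc
        constructor
        · intro; omega
        · intro hk
          rcases Nat.lt_succ_iff_lt_or_eq.mp hk with hk | rfl
          · exact hk
          · exact absurd hc (by simpa using h)

-- one pass of A's inner loop on a list of the form words.map f
lemma pvStep_map (words : List String) (f : String → Int) (i : Char) :
    (PySem.List.pyRange 0 (words.length : Int) 1).foldl (fun t j =>
        if (PySem.List.pyGetD words j "").toList.contains i then t.set j.toNat 0 else t)
        (words.map f)
      = words.map (fun w => if w.toList.contains i then 0 else f w) := by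
  rw [pvInner_eq]
  refine List.ext_getElem (by simp) ?_
  intro k h1 h2
  simp only [List.getElem_mapIdx, List.getElem_map]
  have hk : k < words.length := by simpa using h2
  simp only [PySem.List.pyGetD_natCast, List.getD_eq_getElem?_getD,
    List.getElem?_eq_getElem hk, Option.getD_some, hk, true_and]

-- A's full outer loop computes, per word, whether some processed letter occurs in it
lemma pvOuter (bs : List Char) (words : List String) (f : String → Int) :
    bs.foldl (fun t i =>
        (PySem.List.pyRange 0 (words.length : Int) 1).foldl (fun t j =>
          if (PySem.List.pyGetD words j "").toList.contains i then t.set j.toNat 0 else t) t)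
        (words.map f)
      = words.map (fun w => if w.toList.any (fun c => bs.contains c) then 0 else f w) := by
  induction bs generalizing f with
  | nil => simp
  | cons i rest ih =>
      rw [List.foldl_cons, pvStep_map, ih]
      refine List.map_congr_left fun w _ => ?_
      have key : (w.toList.any fun c => (i :: rest).contains c)
          = (w.toList.contains i || w.toList.any fun c => rest.contains c) := by
        rw [Bool.eq_iff_iff]
        simp only [List.any_eq_true, List.contains_eq_mem, List.mem_cons, Bool.or_eq_true,
          decide_eq_true_eq]
        constructor
        · rintro ⟨x, hx, rfl | hxr⟩
          · exact Or.inl hx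
          · exact Or.inr ⟨x, hx, hxr⟩
        · rintro (h | ⟨x, hx, hxr⟩)
          · exact ⟨i, h, Or.inl rfl⟩
          · exact ⟨x, hx, Or.inr hxr⟩
      rw [key]
      cases w.toList.contains i <;> cases w.toList.any fun c => rest.contains c <;> simp

-- summing a 0/1 list counts the 1-positions
lemma pvSum_map (words : List String) (p : String → Bool) :
    (words.map (fun w => if p w then (0 : Int) else 1)).sum
      = (words.countP (fun w => !p w) : Int) := by
  induction words with
  | nil => simp
  | cons w ws ih =>
      simp only [List.map_cons, List.sum_cons, List.countP_cons, ih]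
      by_cases h : p w <;> simp [h] <;> ring

-- ===== VERDICT (by name: the statement is the Claim_ definition above) =====
theorem canBeTypeWords_spec : Claim_equal_canBeTypeWords := by
  intro text brokenLetters _
  unfold Spec_canBeTypeWords canBeTypeWords canBeTypeWords_alt
  simp only
  have h1 : ∀ (l : List String), List.replicate l.length (1 : Int) = l.map fun _ => 1 := by
    intro l
    induction l with
    | nil => rfl
    | cons a l ih => rw [List.length_cons, List.replicate_succ, ih, List.map_cons]
  rw [h1, pvOuter, pvSum_map]
  congr 1
  apply List.countP_congr
  intro w _
  have hc : ∀ c : Char, (PySem.Set.ofList brokenLetters.toList).contains c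
      = brokenLetters.toList.contains c := by
    intro c
    rw [Bool.eq_iff_iff]
    simp [PySem.Set.mem_ofList]
  have h2 : ∀ (l : List Char) (p : Char → Bool), (!(l.any p)) = l.all (fun c => !(p c)) := by
    intro l p
    induction l with
    | nil => rfl
    | cons c cs ih => simp [ih]
  simp only [hc, h2]
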